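-- pv_equiv track=rewrite | github.com/viyiviyi/prompts-filter | scripts/prompts-filter.py | filter_empty
-- ===== SOURCE A (Python) =====
-- from typing import List
--
-- left_symbol = ['[','{','(']
--
-- right_symbol = [']','}',')']
--
-- def get_prompt(input:str):
--     return input.strip().lower()
--
-- def filter_empty(prompts:List[str],tag:str):
--     if len(prompts) == 0:
--         if tag in right_symbol: return prompts,None
--         return prompts,tag
--     last = get_prompt(prompts[-1])
--     item = get_prompt(tag)
--     if item == ',' and last == ',':
--         return prompts,None
--     if item == ',' and last in left_symbol:
--         return prompts,None
--     if item in right_symbol and last == ',':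
--         prompts = prompts[:-1]
--         return filter_empty(prompts,tag)
--     if item in right_symbol and last in left_symbol:
--         prompts = prompts[:-1]
--         return filter_empty(prompts,tag)
--     return prompts,tag
-- ===== SOURCE B (Python) =====
-- from typing import List
--
-- left_symbol = ['[','{','(']
--
-- right_symbol = [']','}',')']
--
-- def get_prompt(input:str):
--     return input.strip().lower()
--
-- def filter_empty(prompts:List[str],tag:str):
--     item = get_prompt(tag)
--     if prompts and item == ',':
--         last = get_prompt(prompts[-1])
--         if last == ',' or last in left_symbol:
--             return prompts, None
--     if item in right_symbol:
--         while prompts: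
--             last = get_prompt(prompts[-1])
--             if last != ',' and last not in left_symbol:
--                 break
--             prompts = prompts[:-1]
--         if not prompts:
--             return prompts, (None if tag in right_symbol else tag)
--     return prompts, tag
-- ===== Notes on version B (the rewrite author's own statement) =====
-- stated objective: simpler
-- what changed: Replaces A's tail recursion (which re-tests all four guards at every level) with a single explicit while loop that strips trailing ','/left-bracket tokens once the tag is a right symbol, then applies the base/default cases once.
import Mathlib
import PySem

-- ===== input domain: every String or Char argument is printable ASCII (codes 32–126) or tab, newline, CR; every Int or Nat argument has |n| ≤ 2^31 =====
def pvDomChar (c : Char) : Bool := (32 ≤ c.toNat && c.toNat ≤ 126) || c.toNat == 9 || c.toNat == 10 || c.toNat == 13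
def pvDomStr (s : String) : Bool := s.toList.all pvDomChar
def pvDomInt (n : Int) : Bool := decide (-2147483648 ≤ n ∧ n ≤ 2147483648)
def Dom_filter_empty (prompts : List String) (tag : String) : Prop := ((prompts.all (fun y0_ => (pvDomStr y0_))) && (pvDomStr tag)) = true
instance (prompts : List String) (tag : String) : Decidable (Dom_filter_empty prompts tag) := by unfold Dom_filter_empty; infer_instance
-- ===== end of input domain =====

-- B replaces A's tail recursion by a single while loop that strips trailing ','/left-bracket
-- tokens once the tag is a right symbol (objective: simpler iterative decomposition; B does not
-- mutate its argument where A only rebinds a local, so observable behaviour is identical).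

-- ===== PORT A =====
def pvLeftSymbol : List String := ["[", "{", "("]
def pvRightSymbol : List String := ["]", "}", ")"]

-- get_prompt(input) = input.strip().lower()
def pvGetPrompt (s : String) : String := PySem.Str.lower (PySem.Str.strip s)

-- literal port of A: prompts[-1] on a non-empty list is its last element; prompts[:-1] drops it
def filter_empty (prompts : List String) (tag : String) : List String × Option String :=
  match h : prompts.getLast? with
  | none =>
      if tag ∈ pvRightSymbol then (prompts, none) else (prompts, some tag)
  | some lastEl =>
      let last := pvGetPrompt lastEl
      let item := pvGetPrompt tag
      if item = "," ∧ last = "," then (prompts, none)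
      else if item = "," ∧ last ∈ pvLeftSymbol then (prompts, none)
      else if item ∈ pvRightSymbol ∧ last = "," then filter_empty prompts.dropLast tag
      else if item ∈ pvRightSymbol ∧ last ∈ pvLeftSymbol then filter_empty prompts.dropLast tag
      else (prompts, some tag)
termination_by prompts.length
decreasing_by
  all_goals
    cases prompts with
    | nil => simp [List.getLast?] at h
    | cons x xs => simp

-- ===== PORT B =====
-- the while loop of B: drop trailing elements whose get_prompt is ',' or a left symbol
def pvStripTrail (prompts : List String) : List String :=
  match h : prompts.getLast? with
  | none => prompts
  | some lastEl =>
      if pvGetPrompt lastEl = "," ∨ pvGetPrompt lastEl ∈ pvLeftSymbol then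
        pvStripTrail prompts.dropLast
      else prompts
termination_by prompts.length
decreasing_by
  cases prompts with
  | nil => simp [List.getLast?] at h
  | cons x xs => simp

def filter_empty_alt (prompts : List String) (tag : String) : List String × Option String :=
  let item := pvGetPrompt tag
  let commaGuard : Bool :=
    match prompts.getLast? with
    | none => false
    | some lastEl =>
        item = "," ∧ (pvGetPrompt lastEl = "," ∨ pvGetPrompt lastEl ∈ pvLeftSymbol)
  if commaGuard then (prompts, none)
  else if item ∈ pvRightSymbol then
    let p := pvStripTrail prompts
    if p = [] then (p, if tag ∈ pvRightSymbol then none else some tag)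
    else (p, some tag)
  else (prompts, some tag)

-- ===== PRECONDITION & SPEC =====
def Spec_filter_empty (prompts : List String) (tag : String) (out : List String × Option String) : Prop := out = filter_empty_alt prompts tag
instance (prompts : List String) (tag : String) (out : List String × Option String) : Decidable (Spec_filter_empty prompts tag out) := by unfold Spec_filter_empty; infer_instance

-- ===== CLAIM (what is proved, stated in full; the proofs are below) =====
def Claim_equal_filter_empty : Prop := ∀ (prompts : List String) (tag : String), Dom_filter_empty prompts tag → Spec_filter_empty prompts tag (filter_empty prompts tag)

-- ===== LEMMAS AND PROOFS =====
theorem gp_right {tag : String} (h : tag ∈ pvRightSymbol) : pvGetPrompt tag = tag := by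
  simp [pvRightSymbol] at h; rcases h with rfl|rfl|rfl <;> decide

theorem right_ne_comma {s : String} (h : s ∈ pvRightSymbol) : s ≠ "," := by
  simp [pvRightSymbol] at h; rcases h with rfl|rfl|rfl <;> decide

theorem fe_none {x : List String} {tag : String} (h : x.getLast? = none) :
    filter_empty x tag = if tag ∈ pvRightSymbol then (x, none) else (x, some tag) := by
  rw [filter_empty]; split <;> simp_all

theorem fe_some {x : List String} {tag lastEl : String} (h : x.getLast? = some lastEl) :
    filter_empty x tag =
      (let last := pvGetPrompt lastEl
       let item := pvGetPrompt tag
       if item = "," ∧ last = "," then (x, none)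
       else if item = "," ∧ last ∈ pvLeftSymbol then (x, none)
       else if item ∈ pvRightSymbol ∧ last = "," then filter_empty x.dropLast tag
       else if item ∈ pvRightSymbol ∧ last ∈ pvLeftSymbol then filter_empty x.dropLast tag
       else (x, some tag)) := by
  rw [filter_empty]; split <;> simp_all

theorem st_none {x : List String} (h : x.getLast? = none) : pvStripTrail x = x := by
  rw [pvStripTrail]; split <;> simp_all

theorem st_some {x : List String} {lastEl : String} (h : x.getLast? = some lastEl) :
    pvStripTrail x =
      if pvGetPrompt lastEl = "," ∨ pvGetPrompt lastEl ∈ pvLeftSymbol then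
        pvStripTrail x.dropLast
      else x := by
  rw [pvStripTrail]; split <;> simp_all

theorem alt_guard_false {x : List String} {tag : String} (hic : pvGetPrompt tag ≠ ",") :
    filter_empty_alt x tag =
      (if pvGetPrompt tag ∈ pvRightSymbol then
        (if pvStripTrail x = [] then (pvStripTrail x, if tag ∈ pvRightSymbol then none else some tag)
         else (pvStripTrail x, some tag))
      else (x, some tag)) := by
  cases hd : x.getLast? <;> simp [filter_empty_alt, hd, hic]

theorem pv_main : ∀ (prompts : List String) (tag : String),
    filter_empty prompts tag = filter_empty_alt prompts tag := by
  intro prompts tag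
  induction prompts using filter_empty.induct tag with
  | case1 x hnone htag =>
      have hx : x = [] := List.getLast?_eq_none_iff.mp hnone
      subst hx
      rw [fe_none rfl, if_pos htag,
          alt_guard_false (by rw [gp_right htag]; exact right_ne_comma htag),
          if_pos (by rw [gp_right htag]; exact htag)]
      simp [st_none (x := ([] : List String)) rfl, htag]
  | case2 x hnone htag =>
      have hx : x = [] := List.getLast?_eq_none_iff.mp hnone
      subst hx
      rw [fe_none rfl, if_neg htag]
      by_cases hcm : pvGetPrompt tag = ","
      · have hnr : pvGetPrompt tag ∉ pvRightSymbol := by rw [hcm]; decide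
        simp [filter_empty_alt, hcm]
        exact fun h => absurd h (by decide)
      · rw [alt_guard_false hcm]
        by_cases hir : pvGetPrompt tag ∈ pvRightSymbol
        · simp [hir, st_none (x := ([] : List String)) rfl, htag]
        · simp [hir]
  | case3 x lastEl hlast _la _it hcond =>
      have hi : pvGetPrompt tag = "," := hcond.1
      have hl : pvGetPrompt lastEl = "," := hcond.2
      rw [fe_some hlast]
      simp only [filter_empty_alt, hlast]
      simp [hi, hl]
  | case4 x lastEl hlast _la _it h3 hcond =>
      have hi : pvGetPrompt tag = "," := hcond.1
      have hl : pvGetPrompt lastEl ∈ pvLeftSymbol := hcond.2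
      have hl2 : pvGetPrompt lastEl ≠ "," := fun e => h3 ⟨hcond.1, e⟩
      rw [fe_some hlast]
      simp only [filter_empty_alt, hlast]
      simp [hi, hl, hl2]
  | case5 x lastEl hlast _la _it h3 h4 hcond ih =>
      have hi : pvGetPrompt tag ∈ pvRightSymbol := hcond.1
      have hl : pvGetPrompt lastEl = "," := hcond.2
      have hic : pvGetPrompt tag ≠ "," := right_ne_comma hi
      rw [fe_some hlast]
      simp only []
      rw [if_neg (fun h => hic h.1), if_neg (fun h => hic h.1), if_pos (⟨hi, hl⟩ : _ ∧ _),
          ih, alt_guard_false hic, alt_guard_false hic, if_pos hi, if_pos hi,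
          st_some hlast, if_pos (Or.inl hl)]
  | case6 x lastEl hlast _la _it h3 h4 h5 hcond ih =>
      have hi : pvGetPrompt tag ∈ pvRightSymbol := hcond.1
      have hl : pvGetPrompt lastEl ∈ pvLeftSymbol := hcond.2
      have hic : pvGetPrompt tag ≠ "," := right_ne_comma hi
      have h5' : ¬(pvGetPrompt tag ∈ pvRightSymbol ∧ pvGetPrompt lastEl = ",") := h5
      rw [fe_some hlast]
      simp only []
      rw [if_neg (fun h => hic h.1), if_neg (fun h => hic h.1), if_neg h5',
          if_pos (⟨hi, hl⟩ : _ ∧ _),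
          ih, alt_guard_false hic, alt_guard_false hic, if_pos hi, if_pos hi,
          st_some hlast, if_pos (Or.inr hl)]
  | case7 x lastEl hlast _la _it h3 h4 h5 h6 =>
      have h3' : ¬(pvGetPrompt tag = "," ∧ pvGetPrompt lastEl = ",") := h3
      have h4' : ¬(pvGetPrompt tag = "," ∧ pvGetPrompt lastEl ∈ pvLeftSymbol) := h4
      have h5' : ¬(pvGetPrompt tag ∈ pvRightSymbol ∧ pvGetPrompt lastEl = ",") := h5
      have h6' : ¬(pvGetPrompt tag ∈ pvRightSymbol ∧ pvGetPrompt lastEl ∈ pvLeftSymbol) := h6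
      have hne : x ≠ [] := by rintro rfl; simp at hlast
      rw [fe_some hlast]
      simp only []
      rw [if_neg h3', if_neg h4', if_neg h5', if_neg h6']
      by_cases hcm : pvGetPrompt tag = ","
      · have hnr : pvGetPrompt tag ∉ pvRightSymbol := by rw [hcm]; decide
        have hlc : pvGetPrompt lastEl ≠ "," := fun e => h3' ⟨hcm, e⟩
        have hll : pvGetPrompt lastEl ∉ pvLeftSymbol := fun e => h4' ⟨hcm, e⟩
        simp [filter_empty_alt, hlast, hlc, hll, hnr]
      · rw [alt_guard_false hcm]
        by_cases hir : pvGetPrompt tag ∈ pvRightSymbol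
        · have hl1 : pvGetPrompt lastEl ≠ "," := fun hl => h5' ⟨hir, hl⟩
          have hl2 : pvGetPrompt lastEl ∉ pvLeftSymbol := fun hl => h6' ⟨hir, hl⟩
          rw [st_some hlast]
          simp [hl1, hl2, hir, hne]
        · simp [hir]

-- ===== VERDICT (by name: the statement is the Claim_ definition above) =====
theorem filter_empty_spec : Claim_equal_filter_empty := by
  intro prompts tag _
  unfold Spec_filter_empty
  exact pv_main prompts tag
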